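-- pv_equiv track=rewrite | github.com/kim-byoungkwan/CodingTest_final | 학원/파이썬/0809김병관/학원_수업1_1차_2급_4(숙제).py | solution
-- ===== SOURCE A (Python) =====
-- def solution(arr):
--
--     dict = {}
--
--     for i in range(len(arr)):
--
--         dict[arr[i]] = dict.get(arr[i],0) + 1
--
--     value_box = dict.values()
--
--     max1 = max(value_box)
--
--     min1 = min(value_box)
--
--     result = max1//min1
--
--     return result
-- ===== SOURCE B (Python) =====
-- def solution(arr):
--     s = sorted(arr)
--     runs = []
--     cur = None
--     n = 0
--     for x in s:
--         if n > 0 and x == cur: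
--             n += 1
--         else:
--             if n > 0:
--                 runs.append(n)
--             cur = x
--             n = 1
--     if n > 0:
--         runs.append(n)
--     return max(runs) // min(runs)
-- ===== Notes on version B (the rewrite author's own statement) =====
-- stated objective: alternative
-- what changed: B sorts the list and scans it once, collecting lengths of consecutive equal runs as the frequencies, instead of A's index loop building a hash-dictionary counter; the answer is max(run lengths) // min(run lengths).
import Mathlib
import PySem

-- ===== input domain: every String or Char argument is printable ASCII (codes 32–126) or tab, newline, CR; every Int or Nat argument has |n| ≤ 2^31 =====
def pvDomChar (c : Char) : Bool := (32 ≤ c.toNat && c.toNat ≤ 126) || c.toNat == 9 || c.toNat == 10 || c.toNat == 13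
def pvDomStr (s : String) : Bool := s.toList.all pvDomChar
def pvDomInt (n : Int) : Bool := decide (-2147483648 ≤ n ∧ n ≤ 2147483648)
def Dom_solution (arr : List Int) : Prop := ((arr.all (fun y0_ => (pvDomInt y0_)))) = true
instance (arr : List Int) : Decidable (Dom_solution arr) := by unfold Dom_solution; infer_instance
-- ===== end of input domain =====

-- B counts element frequencies by sorting and scanning consecutive runs instead of A's
-- dictionary counter; same value max(freq)//min(freq), objective: alternative (not faster).

-- ===== PORT A =====
def solution (arr : List Int) : Int :=
  let dict := (PySem.List.pyRange 0 (PySem.List.len arr) 1).foldl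
    (fun d i =>
      d.insert (PySem.List.pyGetD arr i 0) (d.getD (PySem.List.pyGetD arr i 0) 0 + 1))
    PySem.Dict.empty
  let value_box := dict.values
  match PySem.List.max? value_box (fun v => v), PySem.List.min? value_box (fun v => v) with
  | some max1, some min1 => PySem.Int.floordiv max1 min1
  | _, _ => 0  -- unreachable: Pre_solution rules out empty arr (Python raises ValueError there)

-- ===== PORT B =====
def solution_alt (arr : List Int) : Int :=
  let s := PySem.List.sorted arr (fun x => x) false
  let st := s.foldl
    (fun st x =>
      if st.2.2 > 0 && st.2.1 == some x then (st.1, st.2.1, st.2.2 + 1)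
      else ((if st.2.2 > 0 then st.1 ++ [st.2.2] else st.1), some x, (1 : Int)))
    (([] : List Int), (none : Option Int), (0 : Int))
  let runs := if st.2.2 > 0 then st.1 ++ [st.2.2] else st.1
  match PySem.List.max? runs (fun v => v) with
  | none => 0  -- unreachable under Pre_solution (Python max() raises on an empty list)
  | some mx =>
    match PySem.List.min? runs (fun v => v) with
    | none => 0
    | some mn => PySem.Int.floordiv mx mn

-- ===== PRECONDITION & SPEC =====
-- Pre_ excludes only the empty list, on which Python's max() raises ValueError in both A and B.
def Pre_solution (arr : List Int) : Prop := arr ≠ []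
instance (arr : List Int) : Decidable (Pre_solution arr) := by unfold Pre_solution; infer_instance
def pvWitness_solution : List Int := [1, 2, 2]

def Spec_solution (arr : List Int) (out : Int) : Prop := out = solution_alt arr
instance (arr : List Int) (out : Int) : Decidable (Spec_solution arr out) := by unfold Spec_solution; infer_instance

-- ===== CLAIM (what is proved, stated in full; the proofs are below) =====
def Claim_equal_solution : Prop := ∀ (arr : List Int), Dom_solution arr → Pre_solution arr → Spec_solution arr (solution arr)

-- ===== LEMMAS AND PROOFS =====

-- reference recursion for B's run-length scan (proof-only)
def goSpec (cur n : Int) : List Int → List Int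
  | [] => [n]
  | y :: t => if y == cur then goSpec cur (n + 1) t else n :: goSpec y 1 t

-- B's fold, named for the lemmas
def stepB (st : List Int × Option Int × Int) (x : Int) : List Int × Option Int × Int :=
  if st.2.2 > 0 && st.2.1 == some x then (st.1, st.2.1, st.2.2 + 1)
  else ((if st.2.2 > 0 then st.1 ++ [st.2.2] else st.1), some x, (1 : Int))

lemma loop_go (t : List Int) : ∀ (cur n : Int) (runs : List Int), 0 < n →
    (let r := t.foldl stepB (runs, some cur, n)
     if r.2.2 > 0 then r.1 ++ [r.2.2] else r.1) = runs ++ goSpec cur n t := by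
  induction t with
  | nil =>
    intro cur n runs hn
    simp [goSpec, hn]
  | cons y t ih =>
    intro cur n runs hn
    simp only [List.foldl_cons]
    by_cases h : y = cur
    · have : stepB (runs, some cur, n) y = (runs, some cur, n + 1) := by
        simp [stepB, hn, h]
      rw [this, ih cur (n + 1) runs (by omega)]
      simp [goSpec, h]
    · have : stepB (runs, some cur, n) y = (runs ++ [n], some y, 1) := by
        simp [stepB, hn, Ne.symm h]
      rw [this, ih y 1 (runs ++ [n]) (by omega)]
      simp [goSpec, h]

lemma goSpec_mem (t : List Int) : ∀ (cur n v : Int), (cur :: t).Pairwise (· ≤ ·) →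
    (v ∈ goSpec cur n t ↔ v = n + (t.count cur : Int) ∨ ∃ k ∈ t, k ≠ cur ∧ v = (t.count k : Int)) := by
  induction t with
  | nil =>
    intro cur n v _
    simp [goSpec]
  | cons y t ih =>
    intro cur n v hp
    have hcy : cur ≤ y := (List.pairwise_cons.1 hp).1 y (by simp)
    have hpy : (y :: t).Pairwise (· ≤ ·) := (List.pairwise_cons.1 hp).2
    by_cases h : y = cur
    · subst h
      rw [show goSpec y n (y :: t) = goSpec y (n + 1) t by simp [goSpec]]
      rw [ih y (n + 1) v hpy]
      constructor
      · rintro (hv | ⟨k, hk, hne, hv⟩)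
        · left
          rw [List.count_cons_self]
          push_cast
          omega
        · right
          refine ⟨k, by simp [hk], hne, ?_⟩
          rw [List.count_cons_of_ne (Ne.symm hne)]
          exact hv
      · rintro (hv | ⟨k, hk, hne, hv⟩)
        · left
          rw [List.count_cons_self] at hv
          push_cast at hv
          omega
        · right
          rcases List.mem_cons.1 hk with rfl | hk'
          · exact absurd rfl hne
          · refine ⟨k, hk', hne, ?_⟩
            rwa [List.count_cons_of_ne (Ne.symm hne)] at hv
    · have hlt : cur < y := lt_of_le_of_ne hcy (Ne.symm h)
      have hcount : t.count cur = 0 := by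
        rw [List.count_eq_zero]
        intro hc
        have := List.rel_of_pairwise_cons hpy hc
        omega
      rw [show goSpec cur n (y :: t) = n :: goSpec y 1 t by simp [goSpec, h]]
      rw [List.mem_cons, ih y 1 v hpy]
      have hycnt : ((y :: t).count cur : Int) = 0 := by
        rw [List.count_cons_of_ne h]
        exact_mod_cast hcount
      constructor
      · rintro (rfl | hv | ⟨k, hk, hne, hv⟩)
        · left; omega
        · right
          refine ⟨y, by simp, Ne.symm (ne_of_lt hlt), ?_⟩
          rw [List.count_cons_self]
          push_cast
          omega
        · have hky : y ≤ k := List.rel_of_pairwise_cons hpy hk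
          right
          refine ⟨k, by simp [hk], by omega, ?_⟩
          rw [List.count_cons_of_ne (Ne.symm hne)]
          exact hv
      · rintro (hv | ⟨k, hk, hne, hv⟩)
        · left; omega
        · rcases List.mem_cons.1 hk with rfl | hk'
          · right; left
            rw [List.count_cons_self] at hv
            push_cast at hv
            omega
          · by_cases hkey : k = y
            · subst hkey
              right; left
              rw [List.count_cons_self] at hv
              push_cast at hv
              omega
            · right; right
              refine ⟨k, hk', hkey, ?_⟩
              rwa [List.count_cons_of_ne (Ne.symm hkey)] at hv

-- the list of run lengths B aggregates, as a function of the sorted list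
def runsOf (s : List Int) : List Int :=
  let r := s.foldl stepB (([] : List Int), (none : Option Int), (0 : Int))
  if r.2.2 > 0 then r.1 ++ [r.2.2] else r.1

lemma runsOf_mem (s : List Int) (hs : s.Pairwise (· ≤ ·)) (v : Int) :
    v ∈ runsOf s ↔ ∃ k ∈ s, v = (s.count k : Int) := by
  cases s with
  | nil => simp [runsOf]
  | cons x t =>
    have hstep : stepB (([] : List Int), (none : Option Int), (0 : Int)) x
        = ([], some x, 1) := by simp [stepB]
    have hgo := loop_go t x 1 [] (by omega)
    have : runsOf (x :: t) = goSpec x 1 t := by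
      simp only [runsOf, List.foldl_cons, hstep]
      simpa using hgo
    rw [this, goSpec_mem t x 1 v hs]
    constructor
    · rintro (hv | ⟨k, hk, hne, hv⟩)
      · refine ⟨x, by simp, ?_⟩
        rw [List.count_cons_self]
        push_cast
        omega
      · refine ⟨k, by simp [hk], ?_⟩
        rw [List.count_cons_of_ne (Ne.symm hne)]
        exact hv
    · rintro ⟨k, hk, hv⟩
      rcases List.mem_cons.1 hk with rfl | hk'
      · left
        rw [List.count_cons_self] at hv
        push_cast at hv
        omega
      · by_cases hkx : k = x
        · subst hkx
          left
          rw [List.count_cons_self] at hv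
          push_cast at hv
          omega
        · right
          refine ⟨k, hk', hkx, ?_⟩
          rwa [List.count_cons_of_ne (Ne.symm hkx)] at hv

-- A's dict values, membership characterisation
lemma valuesA_mem (arr : List Int) (v : Int) :
    v ∈ (PySem.Dict.counter arr).values ↔ ∃ k ∈ arr, v = (arr.count k : Int) := by
  have : (PySem.Dict.counter arr).values
      = (PySem.Set.ofList arr).map (fun k => (arr.count k : Int)) := by
    show ((PySem.Dict.counter arr).items).map Prod.snd = _
    rw [PySem.Dict.items_counter]
    simp [List.map_map, Function.comp]
  rw [this]
  simp only [List.mem_map, PySem.Set.mem_ofList]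
  constructor
  · rintro ⟨k, hk, rfl⟩; exact ⟨k, hk, rfl⟩
  · rintro ⟨k, hk, rfl⟩; exact ⟨k, hk, rfl⟩

-- max?/min? only depend on the set of elements
lemma max?_eq_of_iff (l₁ l₂ : List Int) (h : ∀ v, v ∈ l₁ ↔ v ∈ l₂) (hne : l₁ ≠ []) :
    PySem.List.max? l₁ (fun v => v) = PySem.List.max? l₂ (fun v => v) := by
  have hne₂ : l₂ ≠ [] := by
    cases l₁ with
    | nil => exact absurd rfl hne
    | cons a t =>
      intro h2
      have := (h a).1 (by simp)
      simp [h2] at this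
  obtain ⟨m₁, hm₁⟩ : ∃ m, PySem.List.max? l₁ (fun v => v) = some m := by
    cases hh : PySem.List.max? l₁ (fun v => v) with
    | none => exact absurd ((PySem.List.max?_eq_none_iff _ _).1 hh) hne
    | some m => exact ⟨m, rfl⟩
  obtain ⟨m₂, hm₂⟩ : ∃ m, PySem.List.max? l₂ (fun v => v) = some m := by
    cases hh : PySem.List.max? l₂ (fun v => v) with
    | none => exact absurd ((PySem.List.max?_eq_none_iff _ _).1 hh) hne₂
    | some m => exact ⟨m, rfl⟩
  rw [hm₁, hm₂]
  have h₁ : m₁ ∈ l₁ := PySem.List.max?_mem hm₁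
  have h₂ : m₂ ∈ l₂ := PySem.List.max?_mem hm₂
  have le₁ : m₁ ≤ m₂ := PySem.List.max?_isMax hm₂ m₁ ((h m₁).1 h₁)
  have le₂ : m₂ ≤ m₁ := PySem.List.max?_isMax hm₁ m₂ ((h m₂).2 h₂)
  exact congrArg some (le_antisymm le₁ le₂)

lemma min?_eq_of_iff (l₁ l₂ : List Int) (h : ∀ v, v ∈ l₁ ↔ v ∈ l₂) (hne : l₁ ≠ []) :
    PySem.List.min? l₁ (fun v => v) = PySem.List.min? l₂ (fun v => v) := by
  have hne₂ : l₂ ≠ [] := by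
    cases l₁ with
    | nil => exact absurd rfl hne
    | cons a t =>
      intro h2
      have := (h a).1 (by simp)
      simp [h2] at this
  obtain ⟨m₁, hm₁⟩ : ∃ m, PySem.List.min? l₁ (fun v => v) = some m := by
    cases hh : PySem.List.min? l₁ (fun v => v) with
    | none => exact absurd ((PySem.List.min?_eq_none_iff _ _).1 hh) hne
    | some m => exact ⟨m, rfl⟩
  obtain ⟨m₂, hm₂⟩ : ∃ m, PySem.List.min? l₂ (fun v => v) = some m := by
    cases hh : PySem.List.min? l₂ (fun v => v) with
    | none => exact absurd ((PySem.List.min?_eq_none_iff _ _).1 hh) hne₂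
    | some m => exact ⟨m, rfl⟩
  rw [hm₁, hm₂]
  have h₁ : m₁ ∈ l₁ := PySem.List.min?_mem hm₁
  have h₂ : m₂ ∈ l₂ := PySem.List.min?_mem hm₂
  have le₁ : m₂ ≤ m₁ := PySem.List.min?_isMin hm₂ m₁ ((h m₁).1 h₁)
  have le₂ : m₁ ≤ m₂ := PySem.List.min?_isMin hm₁ m₂ ((h m₂).2 h₂)
  exact congrArg some (le_antisymm le₂ le₁)

-- ===== VERDICT (by name: the statement is the Claim_ definition above) =====
theorem solution_spec : Claim_equal_solution := by
  intro arr _ hpre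
  show solution arr = solution_alt arr
  have hAdict : (PySem.List.pyRange 0 (PySem.List.len arr) 1).foldl
      (fun d i =>
        d.insert (PySem.List.pyGetD arr i 0) (d.getD (PySem.List.pyGetD arr i 0) 0 + 1))
      PySem.Dict.empty = PySem.Dict.counter arr := by
    rw [PySem.List.foldl_pyRange_zero_pyGetD
      (f := fun d x => PySem.Dict.insert d x (d.getD x 0 + 1))]
    exact PySem.Dict.foldl_insert_getD_add_one_eq_counter arr
  have hsortP : (PySem.List.sorted arr (fun x => x) false).Pairwise (· ≤ ·) := by
    have := PySem.List.sorted_pairwise (xs := arr) (key := fun x => x)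
    simpa using this
  have hperm : (PySem.List.sorted arr (fun x => x) false).Perm arr :=
    PySem.List.sorted_perm arr (fun x => x) false
  have hmem : ∀ v, v ∈ (PySem.Dict.counter arr).values ↔
      v ∈ runsOf (PySem.List.sorted arr (fun x => x) false) := by
    intro v
    rw [valuesA_mem, runsOf_mem _ hsortP]
    constructor
    · rintro ⟨k, hk, rfl⟩
      exact ⟨k, hperm.mem_iff.2 hk, by rw [hperm.count_eq]⟩
    · rintro ⟨k, hk, rfl⟩
      exact ⟨k, hperm.mem_iff.1 hk, by rw [hperm.count_eq]⟩
  have hvne : (PySem.Dict.counter arr).values ≠ [] := by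
    cases arr with
    | nil => exact absurd rfl hpre
    | cons a t =>
      intro h
      have := (valuesA_mem (a :: t) ((a :: t).count a : Int)).2 ⟨a, by simp, rfl⟩
      simp [h] at this
  have hmax := max?_eq_of_iff _ _ hmem hvne
  have hmin := min?_eq_of_iff _ _ hmem hvne
  have hBalt : solution_alt arr =
      (match PySem.List.max? (runsOf (PySem.List.sorted arr (fun x => x) false)) (fun v => v) with
       | none => 0
       | some mx =>
         match PySem.List.min? (runsOf (PySem.List.sorted arr (fun x => x) false)) (fun v => v) with
         | none => 0
         | some mn => PySem.Int.floordiv mx mn) := rfl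
  have hAeq : solution arr =
      (match PySem.List.max? ((PySem.Dict.counter arr).values) (fun v => v),
             PySem.List.min? ((PySem.Dict.counter arr).values) (fun v => v) with
       | some mx, some mn => PySem.Int.floordiv mx mn
       | _, _ => 0) := by
    show (match PySem.List.max? (((PySem.List.pyRange 0 (PySem.List.len arr) 1).foldl
      (fun d i =>
        d.insert (PySem.List.pyGetD arr i 0) (d.getD (PySem.List.pyGetD arr i 0) 0 + 1))
      PySem.Dict.empty).values) (fun v => v), PySem.List.min? (((PySem.List.pyRange 0 (PySem.List.len arr) 1).foldl
      (fun d i =>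
        d.insert (PySem.List.pyGetD arr i 0) (d.getD (PySem.List.pyGetD arr i 0) 0 + 1))
      PySem.Dict.empty).values) (fun v => v) with
       | some mx, some mn => PySem.Int.floordiv mx mn
       | _, _ => 0) = _
    rw [hAdict]
  rw [hAeq, hBalt, hmax, hmin]
  cases PySem.List.max? (runsOf (PySem.List.sorted arr (fun x => x) false)) (fun v => v) <;>
    cases PySem.List.min? (runsOf (PySem.List.sorted arr (fun x => x) false)) (fun v => v) <;> rfl
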